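-- pv_equiv track=rewrite | github.com/anuragiit/dsa | q1_google.py | func
-- ===== SOURCE A (Python) =====
-- def func(arr,n):
--     c=0
--     for i in range(n-2):
--         for j in range(i+1,n-1):
--             for k in range(j+1,n):
--                 if arr[i]*arr[j]==arr[k] or arr[k]*arr[j]==arr[i] or arr[i]*arr[k]==arr[j]:
--                     c+=1
--     return c
-- ===== SOURCE B (Python) =====
-- def func(arr, n):
--     # suffix multiset of arr[2:n]; for each pair (i,j) count matching k via dict lookups
--     suffix = {}
--     for v in arr[2:n]:
--         suffix[v] = suffix.get(v, 0) + 1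
--     c = 0
--     for j in range(1, n - 1):
--         b = arr[j]
--         for i in range(j):
--             a = arr[i]
--             if a == 0 and b == 0:
--                 c += n - j - 1
--             else:
--                 vals = {a * b}
--                 if b != 0 and a % b == 0:
--                     vals.add(a // b)
--                 if a != 0 and b % a == 0:
--                     vals.add(b // a)
--                 for v in vals:
--                     c += suffix.get(v, 0)
--         suffix[arr[j + 1]] -= 1
--     return c
-- ===== Notes on version B (the rewrite author's own statement) =====
-- stated objective: faster
-- what changed: Replaces A's cubic scan over all triples by a pair scan: a frequency dict of the suffix arr[j+1:n] is maintained while iterating pairs (i,j), and the at-most-3 admissible third values (a*b, a//b, b//a) are counted by dict lookup instead of scanning all k; intended as faster (measured ~33x at n=4096; both time out at n=16384 since B is still quadratic).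
import Mathlib
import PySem

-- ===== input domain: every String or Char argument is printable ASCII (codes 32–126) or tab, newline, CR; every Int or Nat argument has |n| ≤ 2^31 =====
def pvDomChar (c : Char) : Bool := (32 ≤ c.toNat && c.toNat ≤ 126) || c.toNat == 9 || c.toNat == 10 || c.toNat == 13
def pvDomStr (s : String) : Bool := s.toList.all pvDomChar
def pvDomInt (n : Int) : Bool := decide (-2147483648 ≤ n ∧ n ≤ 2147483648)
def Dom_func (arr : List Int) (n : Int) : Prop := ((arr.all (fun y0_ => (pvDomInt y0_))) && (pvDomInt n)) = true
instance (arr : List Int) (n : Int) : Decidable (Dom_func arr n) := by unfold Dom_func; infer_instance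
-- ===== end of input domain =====

-- B replaces A's cubic triple scan by a pair scan with a suffix counter dict: for each pair (i,j)
-- the at most 3 admissible third values are looked up in the counter. Intended as faster; the timing
-- run measured B ~33x faster at n=4096 (B is still quadratic, so very large inputs remain slow).

-- ===== PORT A =====
def func (arr : List Int) (n : Int) : Int :=
  (PySem.List.pyRange 0 (n-2)).foldl (fun c i =>
    (PySem.List.pyRange (i+1) (n-1)).foldl (fun c j =>
      (PySem.List.pyRange (j+1) n).foldl (fun c k =>
        if (PySem.List.pyGetD arr i 0 * PySem.List.pyGetD arr j 0 == PySem.List.pyGetD arr k 0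
            || PySem.List.pyGetD arr k 0 * PySem.List.pyGetD arr j 0 == PySem.List.pyGetD arr i 0
            || PySem.List.pyGetD arr i 0 * PySem.List.pyGetD arr k 0 == PySem.List.pyGetD arr j 0)
        then c + 1 else c) c) c) 0

-- ===== PORT B =====
-- candidate third values for the pair (a, b): {a*b} ∪ {a//b if b | a} ∪ {b//a if a | b}
def pvVals (a b : Int) : PySem.Set Int :=
  let vals := PySem.Set.ofList [a * b]
  let vals := if b ≠ 0 ∧ PySem.Int.mod a b = 0 then PySem.Set.add vals (PySem.Int.floordiv a b) else vals
  if a ≠ 0 ∧ PySem.Int.mod b a = 0 then PySem.Set.add vals (PySem.Int.floordiv b a) else vals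

-- one iteration of B's outer loop over j (body of 'for j in range(1, n-1)');
-- 'suffix[arr[j+1]] -= 1' is ported as Dict.modify (the key is always present there)
def pvStep (arr : List Int) (n : Int) (st : Int × PySem.Dict Int Int) (j : Int) :
    Int × PySem.Dict Int Int :=
  let b := PySem.List.pyGetD arr j 0
  let c := (PySem.List.pyRange 0 j).foldl (fun c i =>
      let a := PySem.List.pyGetD arr i 0
      if a = 0 ∧ b = 0 then c + (n - j - 1)
      else (pvVals a b).foldl (fun c v => c + st.2.getD v 0) c) st.1
  (c, st.2.modify (PySem.List.pyGetD arr (j+1) 0) 0 (· - 1))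

def func_alt (arr : List Int) (n : Int) : Int :=
  let suffix := (PySem.List.slice arr (some 2) (some n)).foldl
      (fun d v => d.insert v (d.getD v 0 + 1)) (PySem.Dict.empty : PySem.Dict Int Int)
  ((PySem.List.pyRange 1 (n-1)).foldl (pvStep arr n) (0, suffix)).1

-- ===== PRECONDITION & SPEC =====
-- A raises IndexError exactly when 3 ≤ n and n > len(arr) (the k-loop then reads arr[n-1]);
-- those inputs are excluded, everything else A accepts is admitted.
def Pre_func (arr : List Int) (n : Int) : Prop := n ≤ arr.length ∨ n ≤ 2
instance (arr : List Int) (n : Int) : Decidable (Pre_func arr n) := by unfold Pre_func; infer_instance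
def pvWitness_func : List Int × Int := ([1, 2, 2, 4], 4)
def Spec_func (arr : List Int) (n : Int) (out : Int) : Prop := out = func_alt arr n
instance (arr : List Int) (n : Int) (out : Int) : Decidable (Spec_func arr n out) := by unfold Spec_func; infer_instance

-- ===== CLAIM (what is proved, stated in full; the proofs are below) =====
def Claim_equal_func : Prop := ∀ (arr : List Int) (n : Int), Dom_func arr n → Pre_func arr n → Spec_func arr n (func arr n)

-- ===== LEMMAS AND PROOFS =====

-- the per-triple test of A, on values
def pvP (a b v : Int) : Bool := a * b == v || v * b == a || a * v == b

-- A's innermost count for a fixed pair (i, j)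
def pvCnt (arr : List Int) (n i j : Int) : Int :=
  ((PySem.List.pyRange (j+1) n).countP (fun k =>
    pvP (PySem.List.pyGetD arr i 0) (PySem.List.pyGetD arr j 0) (PySem.List.pyGetD arr k 0)) : Int)

-- what B adds for a fixed pair (i, j)
def pvG (arr : List Int) (n i j : Int) : Int :=
  if PySem.List.pyGetD arr i 0 = 0 ∧ PySem.List.pyGetD arr j 0 = 0 then n - j - 1
  else ((pvVals (PySem.List.pyGetD arr i 0) (PySem.List.pyGetD arr j 0)).map
    (fun v => ((PySem.List.slice arr (some (j+1)) (some n)).count v : Int))).sum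

-- indicator sum over a duplicate-free list
lemma pv_indicator_sum (vals : List Int) (h : vals.Nodup) (x : Int) :
    (vals.map (fun u => if (x == u) = true then (1 : Int) else 0)).sum
      = if x ∈ vals then 1 else 0 := by
  induction vals with
  | nil => simp
  | cons u us ih =>
    have hnd := List.nodup_cons.mp h
    simp only [List.map_cons, List.sum_cons, List.mem_cons]
    rw [ih hnd.2]
    by_cases hx : x = u
    · subst hx
      simp [hnd.1]
    · simp [hx]

-- countP through a duplicate-free list of the satisfying values
lemma pv_countP_eq_sum_counts (s vals : List Int) (p : Int → Bool) (hnd : vals.Nodup)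
    (hp : ∀ v, p v = true ↔ v ∈ vals) :
    (s.countP p : Int) = (vals.map (fun u => (s.count u : Int))).sum := by
  induction s with
  | nil => simp
  | cons x s ih =>
    have hcast : ((s.countP p + if p x = true then 1 else 0 : Nat) : Int)
        = (s.countP p : Int) + (if p x = true then 1 else 0) := by
      split <;> push_cast <;> ring
    rw [List.countP_cons, hcast, ih]
    have hmap : vals.map (fun u => (((x :: s).count u : Nat) : Int))
        = vals.map (fun u => (s.count u : Int) + (if (x == u) = true then (1:Int) else 0)) := by
      apply List.map_congr_left; intro u _
      rw [List.count_cons]; split <;> push_cast <;> ring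
    rw [hmap, PySem.List.sum_map_add_int, pv_indicator_sum vals hnd x]
    have hiff : (if p x = true then (1:Int) else 0) = (if x ∈ vals then 1 else 0) := by
      by_cases hx : x ∈ vals
      · simp [hx, (hp x).mpr hx]
      · have hnp : ¬ p x = true := fun hc => hx ((hp x).mp hc)
        simp [hx, hnp]
    rw [hiff]

lemma pv_vals_nodup (a b : Int) : (pvVals a b).Nodup := by
  unfold pvVals
  dsimp only
  split_ifs <;> (repeat' apply PySem.Set.nodup_add) <;> exact PySem.Set.nodup_ofList _

lemma pv_vals_mem (a b v : Int) (h : ¬(a = 0 ∧ b = 0)) :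
    pvP a b v = true ↔ v ∈ pvVals a b := by
  have hmem : v ∈ pvVals a b ↔ v = a * b
      ∨ (b ≠ 0 ∧ PySem.Int.mod a b = 0 ∧ v = PySem.Int.floordiv a b)
      ∨ (a ≠ 0 ∧ PySem.Int.mod b a = 0 ∧ v = PySem.Int.floordiv b a) := by
    unfold pvVals
    dsimp only
    split_ifs with h1 h2 <;>
      simp_all [PySem.Set.mem_add, PySem.Set.mem_ofList] <;> tauto
  rw [hmem]
  have hP : pvP a b v = true ↔ (a * b = v ∨ v * b = a ∨ a * v = b) := by
    simp [pvP, or_assoc]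
  rw [hP]
  constructor
  · rintro (h1 | h1 | h1)
    · exact Or.inl h1.symm
    · have hb : b ≠ 0 := by rintro rfl; exact h ⟨by linarith, rfl⟩
      have hdvd : b ∣ a := ⟨v, by linarith [mul_comm v b]⟩
      have hmod : PySem.Int.mod a b = 0 := (PySem.Int.mod_eq_zero_iff_dvd a b).mpr hdvd
      refine Or.inr (Or.inl ⟨hb, hmod, ?_⟩)
      have hfd := PySem.Int.floordiv_mul_add_mod a b
      rw [hmod, add_zero] at hfd
      exact mul_right_cancel₀ hb (by linarith : v * b = PySem.Int.floordiv a b * b)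
    · have ha : a ≠ 0 := by rintro rfl; exact h ⟨rfl, by linarith⟩
      have hdvd : a ∣ b := ⟨v, h1.symm⟩
      have hmod : PySem.Int.mod b a = 0 := (PySem.Int.mod_eq_zero_iff_dvd b a).mpr hdvd
      refine Or.inr (Or.inr ⟨ha, hmod, ?_⟩)
      have hfd := PySem.Int.floordiv_mul_add_mod b a
      rw [hmod, add_zero] at hfd
      exact mul_right_cancel₀ ha (by linarith [mul_comm a v])
  · rintro (h1 | ⟨hb, hmod, h1⟩ | ⟨ha, hmod, h1⟩)
    · exact Or.inl h1.symm
    · subst h1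
      have hfd := PySem.Int.floordiv_mul_add_mod a b
      rw [hmod, add_zero] at hfd
      exact Or.inr (Or.inl hfd)
    · subst h1
      have hfd := PySem.Int.floordiv_mul_add_mod b a
      rw [hmod, add_zero] at hfd
      exact Or.inr (Or.inr (by linarith [mul_comm (PySem.Int.floordiv b a) a]))

-- a slice pops its head element
lemma pv_slice_cons (arr : List Int) (m n : Int) (h0 : 0 ≤ m) (h1 : m < n)
    (h2 : n ≤ arr.length) :
    PySem.List.slice arr (some m) (some n)
      = PySem.List.pyGetD arr m 0 :: PySem.List.slice arr (some (m+1)) (some n) := by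
  have h0n : (0:Int) ≤ n := by omega
  rw [PySem.List.slice_toNat arr h0 h0n, PySem.List.slice_toNat arr (by omega) h0n]
  have hm : m.toNat < arr.length := by omega
  rw [List.drop_eq_getElem_cons hm]
  rw [PySem.List.pyGetD_eq_getElem arr 0 h0 (by omega)]
  have he : n.toNat - m.toNat = (n.toNat - (m+1).toNat) + 1 := by omega
  rw [he, List.take_succ_cons]
  have he2 : (m+1).toNat = m.toNat + 1 := by omega
  rw [he2]

-- reading arr over a range is the slice
lemma pv_map_get_eq_slice (t : Nat) (arr : List Int) (a n : Int) (h0 : 0 ≤ a) (h0n : 0 ≤ n)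
    (ht : t = (n - a).toNat) (h2 : n ≤ arr.length) :
    (PySem.List.pyRange a n).map (fun k => PySem.List.pyGetD arr k 0)
      = PySem.List.slice arr (some a) (some n) := by
  induction t generalizing a with
  | zero =>
    have hna : n ≤ a := by omega
    rw [PySem.List.pyRange_one_eq_nil hna, PySem.List.slice_toNat arr h0 h0n]
    have : n.toNat - a.toNat = 0 := by omega
    simp [this]
  | succ t ih =>
    have han : a < n := by omega
    rw [PySem.List.pyRange_one_cons han, List.map_cons,
      ih (a+1) (by omega) (by omega), pv_slice_cons arr a n h0 han h2]

-- the pointwise pair lemma: B's per-pair contribution is A's inner count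
lemma pv_pair (arr : List Int) (n i j : Int) (hj0 : 1 ≤ j) (hj : j < n - 1)
    (h2 : n ≤ arr.length) :
    pvCnt arr n i j = pvG arr n i j := by
  have hslice : (PySem.List.pyRange (j+1) n).map (fun k => PySem.List.pyGetD arr k 0)
      = PySem.List.slice arr (some (j+1)) (some n) :=
    pv_map_get_eq_slice ((n-(j+1)).toNat) arr (j+1) n (by omega) (by omega) rfl h2
  have hcnt : pvCnt arr n i j
      = ((PySem.List.slice arr (some (j+1)) (some n)).countP
          (pvP (PySem.List.pyGetD arr i 0) (PySem.List.pyGetD arr j 0)) : Int) := by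
    unfold pvCnt
    rw [← hslice, List.countP_map]
    rfl
  rw [hcnt]
  unfold pvG
  by_cases hab : PySem.List.pyGetD arr i 0 = 0 ∧ PySem.List.pyGetD arr j 0 = 0
  · rw [if_pos hab, hab.1, hab.2]
    have hall : ∀ v ∈ PySem.List.slice arr (some (j+1)) (some n), pvP 0 0 v = true := by
      intro v _; simp [pvP]
    rw [List.countP_eq_length.mpr hall]
    rw [PySem.List.slice_toNat arr (by omega) (by omega)]
    rw [List.length_take, List.length_drop]
    have : min (n.toNat - (j+1).toNat) (arr.length - (j+1).toNat) = n.toNat - (j+1).toNat := by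
      omega
    rw [this]
    omega
  · rw [if_neg hab]
    exact pv_countP_eq_sum_counts _ _ _ (pv_vals_nodup _ _) (fun v => pv_vals_mem _ _ v hab)

-- exchanging the two summations
lemma pv_swap_sum (f : Int → Int → Int) (N : Int) :
    ((PySem.List.pyRange 0 (N-1)).map
        (fun i => ((PySem.List.pyRange (i+1) N).map (fun j => f i j)).sum)).sum
      = ((PySem.List.pyRange 1 N).map
        (fun j => ((PySem.List.pyRange 0 j).map (fun i => f i j)).sum)).sum := by
  rcases lt_or_ge N 1 with h | h
  · rw [PySem.List.pyRange_one_eq_nil (by omega : N - 1 ≤ 0),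
      PySem.List.pyRange_one_eq_nil (by omega : N ≤ 1)]
    rfl
  · induction N, h using Int.le_induction with
    | base =>
      rw [PySem.List.pyRange_one_eq_nil (by omega : (1:Int) - 1 ≤ 0),
        PySem.List.pyRange_one_eq_nil (le_refl (1:Int))]
      rfl
    | succ N hN ih =>
      have hout : PySem.List.pyRange 0 (N + 1 - 1) = PySem.List.pyRange 0 (N-1) ++ [N-1] := by
        have e : N + 1 - 1 = (N-1) + 1 := by ring
        rw [e, PySem.List.pyRange_one_succ_right (by omega : (0:Int) ≤ N-1)]
      have hout2 : PySem.List.pyRange 1 (N+1) = PySem.List.pyRange 1 N ++ [N] :=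
        PySem.List.pyRange_one_succ_right (by omega)
      rw [hout, hout2, List.map_append, List.sum_append, List.map_append, List.sum_append]
      have hinner : (PySem.List.pyRange 0 (N-1)).map
            (fun i => ((PySem.List.pyRange (i+1) (N+1)).map (fun j => f i j)).sum)
          = (PySem.List.pyRange 0 (N-1)).map
            (fun i => ((PySem.List.pyRange (i+1) N).map (fun j => f i j)).sum + f i N) := by
        apply List.map_congr_left
        intro i hi
        have hi' := PySem.List.mem_pyRange_one.mp hi
        rw [PySem.List.pyRange_one_succ_right (by omega : i + 1 ≤ N), List.map_append,
          List.sum_append]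
        simp
      rw [hinner, PySem.List.sum_map_add_int, ih]
      have hsingle : (([N-1] : List Int).map
            (fun i => ((PySem.List.pyRange (i+1) (N+1)).map (fun j => f i j)).sum)).sum
          = f (N-1) N := by
        have e : N - 1 + 1 = N := by ring
        simp only [List.map_cons, List.map_nil, List.sum_cons, List.sum_nil, e]
        rw [PySem.List.pyRange_one_singleton]
        simp
      have hlast : (([N] : List Int).map
            (fun j => ((PySem.List.pyRange 0 j).map (fun i => f i j)).sum)).sum
          = ((PySem.List.pyRange 0 (N-1)).map (fun i => f i N)).sum + f (N-1) N := by
        simp only [List.map_cons, List.map_nil, List.sum_cons, List.sum_nil]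
        have e2 : N = (N-1)+1 := by ring
        have e : PySem.List.pyRange 0 N = PySem.List.pyRange 0 (N-1) ++ [N-1] := by
          calc PySem.List.pyRange 0 N = PySem.List.pyRange 0 ((N-1)+1) := by rw [← e2]
            _ = _ := PySem.List.pyRange_one_succ_right (by omega)
        rw [e, List.map_append, List.sum_append]
        simp
      rw [hsingle, hlast]
      ring

-- A as a double sum of inner counts
lemma pv_A_sum (arr : List Int) (n : Int) :
    func arr n = ((PySem.List.pyRange 0 (n-2)).map
      (fun i => ((PySem.List.pyRange (i+1) (n-1)).map (fun j => pvCnt arr n i j)).sum)).sum := by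
  unfold func
  rw [PySem.List.foldl_congr_mem _ _
    (fun c i => c + ((PySem.List.pyRange (i+1) (n-1)).map (fun j => pvCnt arr n i j)).sum) 0
    (fun c i _ => by
      rw [PySem.List.foldl_congr_mem _ _ (fun c j => c + pvCnt arr n i j) c
        (fun c' j _ => by
          unfold pvCnt pvP
          exact PySem.List.foldl_if_add_one _ _ _)]
      exact PySem.List.foldl_add _ _ _)]
  rw [PySem.List.foldl_add]
  exact zero_add _

-- B's outer loop, with the counter invariant
lemma pv_B_loop (t : Nat) (arr : List Int) (n : Int) : ∀ (m c : Int) (d : PySem.Dict Int Int),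
    1 ≤ m → t = (n - 1 - m).toNat → n ≤ arr.length →
    (∀ v, d.getD v 0 = ((PySem.List.slice arr (some (m+1)) (some n)).count v : Int)) →
    ((PySem.List.pyRange m (n-1)).foldl (pvStep arr n) (c, d)).1
      = c + ((PySem.List.pyRange m (n-1)).map
          (fun j => ((PySem.List.pyRange 0 j).map (fun i => pvG arr n i j)).sum)).sum := by
  induction t with
  | zero =>
    intro m c d hm ht hlen hd
    rw [PySem.List.pyRange_one_eq_nil (by omega : n - 1 ≤ m)]
    simp
  | succ t ih =>
    intro m c d hm ht hlen hd
    have hmn : m < n - 1 := by omega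
    rw [PySem.List.pyRange_one_cons hmn]
    simp only [List.foldl_cons, List.map_cons, List.sum_cons]
    have hstep : pvStep arr n (c, d) m
        = (c + ((PySem.List.pyRange 0 m).map (fun i => pvG arr n i m)).sum,
           d.modify (PySem.List.pyGetD arr (m+1) 0) 0 (· - 1)) := by
      unfold pvStep
      dsimp only
      congr 1
      rw [PySem.List.foldl_congr_mem _ _ (fun c i => c + pvG arr n i m) c
        (fun acc i _ => by
          dsimp only
          unfold pvG
          by_cases hab : PySem.List.pyGetD arr i 0 = 0 ∧ PySem.List.pyGetD arr m 0 = 0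
          · rw [if_pos hab, if_pos hab]
          · rw [if_neg hab, if_neg hab, PySem.List.foldl_add]
            congr 1
            exact congrArg List.sum (List.map_congr_left (fun v _ => hd v)))]
      exact PySem.List.foldl_add _ _ _
    have hc := pv_slice_cons arr (m+1) n (by omega) (by omega) hlen
    have hinv : ∀ v, (d.modify (PySem.List.pyGetD arr (m+1) 0) 0 (· - 1)).getD v 0
        = ((PySem.List.slice arr (some (m+1+1)) (some n)).count v : Int) := by
      intro v
      rw [PySem.Dict.getD_modify]
      split_ifs with hv
      · rw [hd _, hc, hv, List.count_cons]
        simp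
      · rw [hd v, hc, List.count_cons]
        have hne : (PySem.List.pyGetD arr (m+1) 0 == v) = false := by
          simp [Ne.symm hv]
        simp [hne]
    rw [hstep, ih (m+1) _ _ (by omega) (by omega) hlen hinv]
    ring

-- B as a double sum
lemma pv_B_sum (arr : List Int) (n : Int) (h2 : n ≤ arr.length) :
    func_alt arr n = ((PySem.List.pyRange 1 (n-1)).map
      (fun j => ((PySem.List.pyRange 0 j).map (fun i => pvG arr n i j)).sum)).sum := by
  unfold func_alt
  dsimp only
  rw [pv_B_loop ((n-1-1).toNat) arr n 1 0 _ (by omega) (by omega) h2 (fun v => by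
    rw [PySem.Dict.getD_foldl_insert_add_one]
    norm_num)]
  exact zero_add _

-- ===== VERDICT (by name: the statement is the Claim_ definition above) =====
theorem func_spec : Claim_equal_func := by
  intro arr n _ hpre
  unfold Spec_func
  by_cases hn : n ≤ 2
  · simp [func, func_alt, PySem.List.pyRange_one_eq_nil (by omega : n - 2 ≤ 0),
      PySem.List.pyRange_one_eq_nil (by omega : n - 1 ≤ 1)]
  · have h2 : n ≤ (arr.length : Int) := by
      rcases hpre with h | h
      · exact h
      · omega
    rw [pv_A_sum, pv_B_sum arr n h2]
    have e : n - 2 = (n - 1) - 1 := by ring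
    rw [e, pv_swap_sum (pvCnt arr n) (n-1)]
    apply congrArg List.sum
    apply List.map_congr_left
    intro j hj
    apply congrArg List.sum
    apply List.map_congr_left
    intro i _
    have hj' := PySem.List.mem_pyRange_one.mp hj
    exact pv_pair arr n i j (by omega) (by omega) h2
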